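-- pv_equiv track=rewrite | github.com/rahulsnkr/advent-of-code-23 | day-12/day12part1.py | get_pos_configs
-- ===== SOURCE A (Python) =====
-- def sums(length, total_sum):
--     if length == 1:
--         yield (total_sum,)
--     else:
--         for value in range(total_sum + 1):
--             for permutation in sums(length - 1, total_sum - value):
--                 yield (value,) + permutation
--
-- def get_pos_configs(spring_len, nums):
--     total_nums = sum(nums)
--     total_dots = spring_len - total_nums
--     confirmed_dots = len(nums) - 1
--     all_perms = []
--
--     initial_spring = ['#'*num for num in nums]
--
--     buckets = len(nums) + 1
--     dots_to_ins = total_dots - confirmed_dots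
--     perms = sums(buckets, dots_to_ins)
--     for perm in perms:
--         s = ''
--         s = '.'*perm[0]
--         for i in range(len(initial_spring) - 1):
--             s += initial_spring[i]
--             s += '.'*perm[i+1] + '.'
--         s += initial_spring[-1] + '.'*perm[-1]
--         all_perms.append(s)
--
--     return all_perms
-- ===== SOURCE B (Python) =====
-- def get_pos_configs(spring_len, nums):
--     total_nums = sum(nums)
--     total_dots = spring_len - total_nums
--     confirmed_dots = len(nums) - 1
--     all_perms = []
--
--     initial_spring = ['#'*num for num in nums]
--
--     buckets = len(nums) + 1
--     dots_to_ins = total_dots - confirmed_dots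
--
--     # iterative breadth-first prefix expansion instead of the recursive generator:
--     # items holds (prefix, remaining dots); each round extends every prefix by one
--     # bucket value in ascending order, which keeps the overall lexicographic order.
--     items = [((), dots_to_ins)]
--     for _ in range(buckets - 1):
--         items = [(p + (v,), r - v) for (p, r) in items for v in range(r + 1)]
--
--     for p, r in items:
--         perm = p + (r,)
--         s = ''
--         s = '.'*perm[0]
--         for i in range(len(initial_spring) - 1):
--             s += initial_spring[i]
--             s += '.'*perm[i+1] + '.'
--         s += initial_spring[-1] + '.'*perm[-1]
--         all_perms.append(s)
--
--     return all_perms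
-- ===== Notes on version B (the rewrite author's own statement) =====
-- stated objective: alternative
-- what changed: The recursive sums() generator that yields compositions depth-first is replaced by an iterative breadth-first worklist that expands (prefix, remaining) pairs one bucket per round, producing the same composition list in the same order; the string-building loop is unchanged.
import Mathlib
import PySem

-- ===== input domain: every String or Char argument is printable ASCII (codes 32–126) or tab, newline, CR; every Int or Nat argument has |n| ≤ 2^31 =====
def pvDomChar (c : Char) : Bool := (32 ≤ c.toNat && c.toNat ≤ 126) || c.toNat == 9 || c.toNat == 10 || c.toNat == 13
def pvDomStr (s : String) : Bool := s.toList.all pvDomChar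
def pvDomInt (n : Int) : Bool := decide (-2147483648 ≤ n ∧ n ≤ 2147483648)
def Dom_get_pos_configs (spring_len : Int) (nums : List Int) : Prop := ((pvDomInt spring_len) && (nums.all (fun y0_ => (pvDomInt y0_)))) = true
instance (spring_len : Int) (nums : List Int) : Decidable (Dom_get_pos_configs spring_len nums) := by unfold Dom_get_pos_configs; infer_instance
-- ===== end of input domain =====

-- B replaces A's recursive `sums` generator by an iterative breadth-first prefix expansion
-- of the compositions (same order), keeping the string-building loop identical (objective: alternative).

-- ===== PORT A =====

-- '.'*n / '#'*n : Python string repetition (empty for n ≤ 0)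
def pvStrTimes (c : Char) (n : Int) : String := String.ofList (List.replicate n.toNat c)

-- A's recursive generator sums(length, total_sum), as the list it yields, in order.
-- The 'length < 1' guard only makes the recursion total: Python's sums never terminates
-- for length ≤ 0 and get_pos_configs only calls it with length = len(nums)+1 ≥ 1.
def pvSums (length : Int) (total : Int) : List (List Int) :=
  if length == 1 then [[total]]
  else if length < 1 then []
  else (PySem.List.pyRange 0 (total + 1) 1).flatMap
    (fun v => (pvSums (length - 1) (total - v)).map (fun p => v :: p))
termination_by length.toNat
decreasing_by
  rename_i h1 h2
  simp only [beq_iff_eq] at h1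
  omega

def get_pos_configs (spring_len : Int) (nums : List Int) : List String :=
  let total_nums := nums.sum
  let total_dots := spring_len - total_nums
  let confirmed_dots := (nums.length : Int) - 1
  let initial_spring := nums.map (fun num => pvStrTimes '#' num)
  let buckets := (nums.length : Int) + 1
  let dots_to_ins := total_dots - confirmed_dots
  let perms := pvSums buckets dots_to_ins
  perms.foldl (fun all_perms perm =>
    let s := pvStrTimes '.' (PySem.List.pyGetD perm 0 0)
    let s := (PySem.List.pyRange 0 ((initial_spring.length : Int) - 1) 1).foldl
      (fun s i => s ++ PySem.List.pyGetD initial_spring i ""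
                    ++ (pvStrTimes '.' (PySem.List.pyGetD perm (i + 1) 0) ++ ".")) s
    let s := s ++ (PySem.List.pyGetD initial_spring (-1) "" ++ pvStrTimes '.' (PySem.List.pyGetD perm (-1) 0))
    all_perms ++ [s]) []

-- ===== PORT B =====

def get_pos_configs_alt (spring_len : Int) (nums : List Int) : List String :=
  let total_nums := nums.sum
  let total_dots := spring_len - total_nums
  let confirmed_dots := (nums.length : Int) - 1
  let initial_spring := nums.map (fun num => pvStrTimes '#' num)
  let buckets := (nums.length : Int) + 1
  let dots_to_ins := total_dots - confirmed_dots
  -- items = [((), dots_to_ins)]; buckets-1 rounds of prefix expansion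
  let items : List (List Int × Int) :=
    (List.range (buckets - 1).toNat).foldl
      (fun its _ => its.flatMap (fun pr =>
        (PySem.List.pyRange 0 (pr.2 + 1) 1).map (fun v => (pr.1 ++ [v], pr.2 - v))))
      [(([] : List Int), dots_to_ins)]
  items.foldl (fun all_perms pr =>
    let perm := pr.1 ++ [pr.2]
    let s := pvStrTimes '.' (PySem.List.pyGetD perm 0 0)
    let s := (PySem.List.pyRange 0 ((initial_spring.length : Int) - 1) 1).foldl
      (fun s i => s ++ PySem.List.pyGetD initial_spring i ""
                    ++ (pvStrTimes '.' (PySem.List.pyGetD perm (i + 1) 0) ++ ".")) s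
    let s := s ++ (PySem.List.pyGetD initial_spring (-1) "" ++ pvStrTimes '.' (PySem.List.pyGetD perm (-1) 0))
    all_perms ++ [s]) []

-- ===== PRECONDITION & SPEC =====
-- Pre_ excludes nums = [], on which Python A raises IndexError at initial_spring[-1].
def Pre_get_pos_configs (spring_len : Int) (nums : List Int) : Prop := nums ≠ []
instance (spring_len : Int) (nums : List Int) : Decidable (Pre_get_pos_configs spring_len nums) := by unfold Pre_get_pos_configs; infer_instance
def pvWitness_get_pos_configs : Int × List Int := (5, [1, 2])

def Spec_get_pos_configs (spring_len : Int) (nums : List Int) (out : List String) : Prop := out = get_pos_configs_alt spring_len nums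
instance (spring_len : Int) (nums : List Int) (out : List String) : Decidable (Spec_get_pos_configs spring_len nums out) := by unfold Spec_get_pos_configs; infer_instance

-- ===== CLAIM (what is proved, stated in full; the proofs are below) =====
def Claim_equal_get_pos_configs : Prop := ∀ (spring_len : Int) (nums : List Int), Dom_get_pos_configs spring_len nums → Pre_get_pos_configs spring_len nums → Spec_get_pos_configs spring_len nums (get_pos_configs spring_len nums)

-- ===== LEMMAS AND PROOFS =====

-- B's one expansion round (the lambda folded in get_pos_configs_alt)
def pvStep (its : List (List Int × Int)) : List (List Int × Int) :=
  its.flatMap (fun pr =>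
    (PySem.List.pyRange 0 (pr.2 + 1) 1).map (fun v => (pr.1 ++ [v], pr.2 - v)))

-- a fold that ignores the list's elements is an iterate
lemma pv_foldl_const {α β : Type} (g : β → β) (l : List α) (init : β) :
    l.foldl (fun s _ => g s) init = g^[l.length] init := by
  induction l generalizing init with
  | nil => rfl
  | cons x t ih => simp [List.foldl_cons, ih, Function.iterate_succ_apply]

lemma pvSums_one (t : Int) : pvSums 1 t = [[t]] := by
  rw [pvSums]; simp

lemma pvSums_succ (m : Nat) (t : Int) :
    pvSums ((m : Int) + 2) t = (PySem.List.pyRange 0 (t + 1) 1).flatMap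
      (fun v => (pvSums ((m : Int) + 1) (t - v)).map (fun p => v :: p)) := by
  rw [pvSums]
  have h1 : ¬ (((m : Int) + 2) == 1) = true := by simp; omega
  have h2 : ¬ ((m : Int) + 2 < 1) := by omega
  have h3 : (m : Int) + 2 - 1 = (m : Int) + 1 := by ring
  simp only [h1, h2, if_false, h3]
  simp

-- closing every prefix after m expansion rounds yields A's sums-lists appended to the prefixes
lemma pv_key (m : Nat) : ∀ (items : List (List Int × Int)),
    (pvStep^[m] items).map (fun pr => pr.1 ++ [pr.2])
      = items.flatMap (fun pr => (pvSums ((m : Int) + 1) pr.2).map (fun p => pr.1 ++ p)) := by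
  induction m with
  | zero =>
    intro items
    simp only [Function.iterate_zero, id, List.map_eq_flatMap]
    apply List.flatMap_congr
    intro pr _
    simp [pvSums_one]
  | succ m ih =>
    intro items
    rw [Function.iterate_succ_apply, ih]
    unfold pvStep
    rw [List.flatMap_assoc]
    apply List.flatMap_congr
    intro pr _
    rw [List.flatMap_map]
    have hc : ((m + 1 : Nat) : Int) + 1 = (m : Int) + 2 := by push_cast; ring
    rw [hc, pvSums_succ, List.map_flatMap]
    apply List.flatMap_congr
    intro v _
    simp [List.map_map, Function.comp_def]

lemma pv_foldl_range_step (n : Nat) (init : List (List Int × Int)) :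
    (List.range n).foldl (fun its _ => its.flatMap (fun pr =>
      (PySem.List.pyRange 0 (pr.2 + 1) 1).map (fun v => (pr.1 ++ [v], pr.2 - v)))) init
      = pvStep^[n] init := by
  have h := pv_foldl_const pvStep (List.range n) init
  rw [List.length_range] at h
  exact h

-- ===== VERDICT (by name: the statement is the Claim_ definition above) =====
theorem get_pos_configs_spec : Claim_equal_get_pos_configs := by
  intro spring_len nums _ _
  simp only [Spec_get_pos_configs, get_pos_configs, get_pos_configs_alt]
  rw [pv_foldl_range_step]
  rw [show ((nums.length : Int) + 1 - 1).toNat = nums.length by omega]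
  have h := pv_key nums.length [(([] : List Int), spring_len - nums.sum - ((nums.length : Int) - 1))]
  simp only [List.flatMap_cons, List.flatMap_nil, List.append_nil, List.nil_append,
    List.map_id'] at h
  rw [← h, List.foldl_map]
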